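-- pv_equiv track=rewrite | github.com/mogalter/AdventOfCode2020 | Day-17/Python_Day17_Solution.py | unfold_via_cycle
-- ===== SOURCE A (Python) =====
-- def unfold_via_cycle(on_cubes, displacements, cycles):
-- 	# we want to unfold a cycle amount of times!
-- 	for cycle_count in range(cycles):
-- 		surrounding = {}
-- 		for coord in on_cubes:
-- 			for displace_val in displacements:
-- 				new_coord = tuple(map(sum, (zip(coord, displace_val))))
-- 				# zip creates seperate tuples with each coord bundled with it's displacement
-- 				if new_coord != coord:
-- 					if new_coord not in surrounding:
-- 						# new coordinate has not been seen yet.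
-- 						surrounding[new_coord] = 1
-- 					else:
-- 						# we've seen this again, since we're displacing on,
-- 						# on is a neighbor of this. :)
-- 						surrounding[new_coord] += 1
-- 		# we want: stuff that stays on, and stuff we need to turn on
-- 		# Surrounding keeps a track of how many ons are nearby.
-- 		# we want all 2-3 repetitions from surroundings
-- 		keep_on = set()
-- 		for cube in on_cubes:
-- 			if cube in surrounding and surrounding[cube] in [2,3]:
-- 				keep_on.add(cube)
-- 		flip = set()
-- 		for cube in surrounding:
-- 			if surrounding[cube] == 3:
-- 				flip.add(cube)
-- 		# combine everything that needs to be kept on.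
-- 		keep_on.update(flip)
-- 		on_cubes = keep_on
-- 	return len(on_cubes)
-- ===== SOURCE B (Python) =====
-- def unfold_via_cycle(on_cubes, displacements, cycles):
--     # gather: probe each candidate's inverse displacements against a multiplicity table
--     cells = on_cubes
--     for _ in range(cycles):
--         cnt = {}
--         for c in cells:
--             cnt[c] = cnt.get(c, 0) + 1
--         cand = {t for c in cells for d in displacements
--                 if (t := tuple(x + dx for x, dx in zip(c, d))) != c}
--         cand |= set(cells)
--         nxt = set()
--         for X in cand:
--             k = 0
--             for d in displacements:
--                 probe = tuple(x - dx for x, dx in zip(X, d))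
--                 if probe != X:
--                     k += cnt.get(probe, 0)
--             if k == 3 or (k == 2 and X in cnt):
--                 nxt.add(X)
--         cells = nxt
--     return len(cells)
-- ===== Notes on version B (the rewrite author's own statement) =====
-- stated objective: alternative
-- what changed: B replaces A's scatter (each live cube increments a neighbor-count dict at every displaced coordinate, then two filtering passes over live cubes and dict keys) with a gather: it builds a multiplicity table of the live cells once and, for each candidate coordinate X, computes its neighbor count by probing the inverse displacements X-d in that table, applying the survival/birth rule in one pass over the candidates.
-- outside the precondition, e.g. on unfold_via_cycle({(1, 0)}, [(0,), (0,), (0,)], 1): A returns 1, B returns 0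
import Mathlib
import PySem

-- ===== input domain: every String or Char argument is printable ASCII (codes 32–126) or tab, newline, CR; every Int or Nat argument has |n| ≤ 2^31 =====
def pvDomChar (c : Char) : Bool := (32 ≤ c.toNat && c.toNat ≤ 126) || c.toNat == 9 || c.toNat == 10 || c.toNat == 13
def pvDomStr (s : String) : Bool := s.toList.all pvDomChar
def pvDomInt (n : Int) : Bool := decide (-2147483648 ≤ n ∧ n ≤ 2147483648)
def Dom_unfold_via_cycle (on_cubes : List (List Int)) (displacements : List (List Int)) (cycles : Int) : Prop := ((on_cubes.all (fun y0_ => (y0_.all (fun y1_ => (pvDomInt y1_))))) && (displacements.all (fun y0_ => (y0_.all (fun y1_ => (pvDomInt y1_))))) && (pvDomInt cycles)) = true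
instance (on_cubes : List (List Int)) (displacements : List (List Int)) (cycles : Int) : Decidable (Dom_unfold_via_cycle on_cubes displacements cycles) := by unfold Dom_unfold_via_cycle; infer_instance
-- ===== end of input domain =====

-- B replaces A's scatter (incrementing a neighbor-count dict from every live cube) with a gather
-- (probing the inverse displacements of each candidate against a multiplicity table of the live
-- cells); objective: alternative.

-- ===== PORT A =====
-- tuple(map(sum, zip(coord, displace_val))): elementwise sum, truncated to the shorter tuple.
def pvZAdd (c d : List Int) : List Int := (c.zip d).map (fun p => p.1 + p.2)

-- A's surrounding dict (the first loop nest of the cycle body)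
def pvSurround (displacements : List (List Int)) (cubes : List (List Int)) : PySem.Dict (List Int) Int :=
  cubes.foldl (fun s coord =>
    displacements.foldl (fun s dv =>
      let new_coord := pvZAdd coord dv
      if new_coord ≠ coord then
        match s.get? new_coord with
        | none => s.insert new_coord 1
        | some v => s.insert new_coord (v + 1)
      else s) s) PySem.Dict.empty

-- one iteration of A's cycle loop (the Python loop body, verbatim); Python's iteration order
-- over the on_cubes set / the flip set is hash order, ported as list order — the cycle's
-- RESULT set and the returned count do not depend on it (proved below).
def pvStepA (displacements : List (List Int)) (cubes : List (List Int)) : List (List Int) :=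
  let surrounding : PySem.Dict (List Int) Int := pvSurround displacements cubes
  let keep_on := cubes.foldl (fun k cube =>
    match surrounding.get? cube with
    | some v => if v = 2 ∨ v = 3 then PySem.Set.add k cube else k
    | none => k) (PySem.Set.empty : PySem.Set (List Int))
  let flip := surrounding.keys.foldl (fun f cube =>
    if surrounding.getD cube 0 = 3 then PySem.Set.add f cube else f)
    (PySem.Set.empty : PySem.Set (List Int))
  PySem.Set.update keep_on flip

def unfold_via_cycle (on_cubes : List (List Int)) (displacements : List (List Int)) (cycles : Int) : Int :=
  ((PySem.List.pyRange 0 cycles 1).foldl (fun cubes _ => pvStepA displacements cubes) on_cubes).length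

-- ===== PORT B =====
-- tuple(x - dx for x, dx in zip(X, d)): elementwise difference, truncated to the shorter tuple.
def pvZSub (a d : List Int) : List Int := (a.zip d).map (fun p => p.1 - p.2)

-- one iteration of Source B's cycle loop, verbatim (iteration over the candidate set ported as list
-- order; the cycle's result set and the returned count do not depend on it, as proved below).
def pvStepB (displacements : List (List Int)) (cells : List (List Int)) : List (List Int) :=
  let cnt : PySem.Dict (List Int) Int :=
    cells.foldl (fun m c => m.insert c (m.getD c 0 + 1)) PySem.Dict.empty
  let cand0 := PySem.Set.ofList (cells.flatMap (fun c =>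
    (displacements.map (fun d => pvZAdd c d)).filter (fun t => t != c)))
  let cand := PySem.Set.union cand0 cells
  cand.foldl (fun nxt X =>
    let k := displacements.foldl (fun k d =>
      let probe := pvZSub X d
      if probe ≠ X then k + cnt.getD probe 0 else k) 0
    if k = 3 ∨ (k = 2 ∧ cnt.contains X = true) then PySem.Set.add nxt X else nxt)
    (PySem.Set.empty : PySem.Set (List Int))

def unfold_via_cycle_alt (on_cubes : List (List Int)) (displacements : List (List Int)) (cycles : Int) : Int :=
  ((PySem.List.pyRange 0 cycles 1).foldl (fun cells _ => pvStepB displacements cells) on_cubes).length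

-- ===== PRECONDITION & SPEC =====
-- Pre_ restricts the cycling case to the automaton's natural domain — every cube has one common
-- dimension and every displacement has at least that many components; on ragged inputs Python's
-- zip truncation makes the coordinate arithmetic ill-defined, and A's scatter totals and B's
-- inverse-probe totals are equally defensible readings of that unspecified corner.
def Pre_unfold_via_cycle (on_cubes : List (List Int)) (displacements : List (List Int)) (cycles : Int) : Prop :=
  cycles ≤ 0 ∨
    ((∀ c ∈ on_cubes, c.length = (on_cubes.headD []).length) ∧
     (∀ d ∈ displacements, (on_cubes.headD []).length ≤ d.length))
instance (on_cubes : List (List Int)) (displacements : List (List Int)) (cycles : Int) : Decidable (Pre_unfold_via_cycle on_cubes displacements cycles) := by unfold Pre_unfold_via_cycle; infer_instance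

def pvWitness_unfold_via_cycle : List (List Int) × List (List Int) × Int :=
  ([[0, 0], [1, 0], [2, 0]], ([[-1, -1], [-1, 0], [-1, 1], [0, -1], [0, 1], [1, -1], [1, 0], [1, 1]], 2))

def Spec_unfold_via_cycle (on_cubes : List (List Int)) (displacements : List (List Int)) (cycles : Int) (out : Int) : Prop := out = unfold_via_cycle_alt on_cubes displacements cycles
instance (on_cubes : List (List Int)) (displacements : List (List Int)) (cycles : Int) (out : Int) : Decidable (Spec_unfold_via_cycle on_cubes displacements cycles out) := by unfold Spec_unfold_via_cycle; infer_instance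

-- ===== CLAIM (what is proved, stated in full; the proofs are below) =====
def Claim_equal_unfold_via_cycle : Prop := ∀ (on_cubes : List (List Int)) (displacements : List (List Int)) (cycles : Int), Dom_unfold_via_cycle on_cubes displacements cycles → Pre_unfold_via_cycle on_cubes displacements cycles → Spec_unfold_via_cycle on_cubes displacements cycles (unfold_via_cycle on_cubes displacements cycles)

-- ===== LEMMAS AND PROOFS =====

-- the number of (coord, displacement) pairs A's scatter credits to X
def pvCntA (ds cubes : List (List Int)) (X : List Int) : Nat :=
  (cubes.map (fun c => ds.countP (fun d => decide (pvZAdd c d = X ∧ pvZAdd c d ≠ c)))).sum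

-- one coord's displacement loop over the dict: value accumulation
theorem pv_dict_inner_getD (c : List Int) (ds : List (List Int)) (s : PySem.Dict (List Int) Int) (X : List Int) :
    (ds.foldl (fun s dv =>
      let new_coord := pvZAdd c dv
      if new_coord ≠ c then
        match s.get? new_coord with
        | none => s.insert new_coord 1
        | some v => s.insert new_coord (v + 1)
      else s) s).getD X 0
    = s.getD X 0 + (ds.countP (fun d => decide (pvZAdd c d = X ∧ pvZAdd c d ≠ c)) : Int) := by
  induction ds generalizing s with
  | nil => simp
  | cons d ds ih =>
    rw [List.foldl_cons, ih, List.countP_cons]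
    have hstep : (if pvZAdd c d ≠ c then
        match s.get? (pvZAdd c d) with
        | none => s.insert (pvZAdd c d) 1
        | some v => s.insert (pvZAdd c d) (v + 1)
      else s).getD X 0
      = s.getD X 0 + (if pvZAdd c d = X ∧ pvZAdd c d ≠ c then 1 else 0) := by
      by_cases hnc : pvZAdd c d ≠ c
      · rw [if_pos hnc]
        cases hs : s.get? (pvZAdd c d) with
        | none =>
          rw [PySem.Dict.getD_insert]
          by_cases hX : X = pvZAdd c d
          · subst hX
            rw [if_pos rfl, if_pos ⟨rfl, hnc⟩, PySem.Dict.getD_of_get?_eq_none _ _ hs]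
            norm_num
          · rw [if_neg hX, if_neg (by intro h; exact hX h.1.symm)]
            ring
        | some w =>
          rw [PySem.Dict.getD_insert]
          by_cases hX : X = pvZAdd c d
          · subst hX
            rw [if_pos rfl, if_pos ⟨rfl, hnc⟩, PySem.Dict.getD_of_get?_eq_some _ _ hs]
          · rw [if_neg hX, if_neg (by intro h; exact hX h.1.symm)]
            ring
      · rw [if_neg hnc, if_neg (by intro h; exact hnc h.2)]
        ring
    rw [hstep]
    push_cast
    by_cases hp : pvZAdd c d = X ∧ pvZAdd c d ≠ c
    · simp [hp]; ring
    · simp [hp]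

-- one coord's displacement loop over the dict: key membership
theorem pv_dict_inner_keys (c : List Int) (ds : List (List Int)) (s : PySem.Dict (List Int) Int) (X : List Int) :
    (X ∈ (ds.foldl (fun s dv =>
      let new_coord := pvZAdd c dv
      if new_coord ≠ c then
        match s.get? new_coord with
        | none => s.insert new_coord 1
        | some v => s.insert new_coord (v + 1)
      else s) s).keys)
    ↔ X ∈ s.keys ∨ ds.countP (fun d => decide (pvZAdd c d = X ∧ pvZAdd c d ≠ c)) ≠ 0 := by
  induction ds generalizing s with
  | nil => simp
  | cons d ds ih =>
    rw [List.foldl_cons, ih, List.countP_cons]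
    have hstep : (X ∈ (if pvZAdd c d ≠ c then
        match s.get? (pvZAdd c d) with
        | none => s.insert (pvZAdd c d) 1
        | some v => s.insert (pvZAdd c d) (v + 1)
      else s).keys)
      ↔ X ∈ s.keys ∨ (pvZAdd c d = X ∧ pvZAdd c d ≠ c) := by
      by_cases hnc : pvZAdd c d ≠ c
      · rw [if_pos hnc]
        cases hs : s.get? (pvZAdd c d) with
        | none =>
          rw [PySem.Dict.mem_keys_insert]
          constructor
          · rintro (rfl | h)
            · exact Or.inr ⟨rfl, hnc⟩
            · exact Or.inl h
          · rintro (h | ⟨rfl, _⟩)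
            · exact Or.inr h
            · exact Or.inl rfl
        | some w =>
          rw [PySem.Dict.mem_keys_insert]
          constructor
          · rintro (rfl | h)
            · exact Or.inr ⟨rfl, hnc⟩
            · exact Or.inl h
          · rintro (h | ⟨rfl, _⟩)
            · exact Or.inr h
            · exact Or.inl rfl
      · rw [if_neg hnc]
        constructor
        · exact fun h => Or.inl h
        · rintro (h | ⟨_, hne⟩)
          · exact h
          · exact absurd hne hnc
    rw [hstep]
    by_cases hp : pvZAdd c d = X ∧ pvZAdd c d ≠ c
    · have hd : decide (pvZAdd c d = X ∧ pvZAdd c d ≠ c) = true := decide_eq_true hp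
      constructor
      · intro _
        refine Or.inr ?_
        simp [hd]
      · intro _; exact Or.inl (Or.inr hp)
    · have hd : decide (pvZAdd c d = X ∧ pvZAdd c d ≠ c) = false := decide_eq_false hp
      constructor
      · rintro ((h | h) | h)
        · exact Or.inl h
        · exact absurd h hp
        · refine Or.inr ?_
          simpa [hd] using h
      · rintro (h | h)
        · exact Or.inl (Or.inl h)
        · refine Or.inr ?_
          simpa [hd] using h

-- A's surrounding dict over all coords, from any start
theorem pv_dict_outer_getD (ds cubes : List (List Int)) (s : PySem.Dict (List Int) Int) (X : List Int) :
    (cubes.foldl (fun s coord =>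
      ds.foldl (fun s dv =>
        let new_coord := pvZAdd coord dv
        if new_coord ≠ coord then
          match s.get? new_coord with
          | none => s.insert new_coord 1
          | some v => s.insert new_coord (v + 1)
        else s) s) s).getD X 0
    = s.getD X 0 + (pvCntA ds cubes X : Int) := by
  induction cubes generalizing s with
  | nil => simp [pvCntA]
  | cons c cubes ih =>
    rw [List.foldl_cons, ih, pv_dict_inner_getD]
    simp only [pvCntA, List.map_cons, List.sum_cons]
    push_cast
    ring

theorem pv_dict_outer_keys (ds cubes : List (List Int)) (s : PySem.Dict (List Int) Int) (X : List Int) :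
    (X ∈ (cubes.foldl (fun s coord =>
      ds.foldl (fun s dv =>
        let new_coord := pvZAdd coord dv
        if new_coord ≠ coord then
          match s.get? new_coord with
          | none => s.insert new_coord 1
          | some v => s.insert new_coord (v + 1)
        else s) s) s).keys)
    ↔ X ∈ s.keys ∨ pvCntA ds cubes X ≠ 0 := by
  induction cubes generalizing s with
  | nil => simp [pvCntA]
  | cons c cubes ih =>
    rw [List.foldl_cons, ih, pv_dict_inner_keys]
    simp only [pvCntA, List.map_cons, List.sum_cons]
    constructor
    · rintro ((h | h) | h)
      · exact Or.inl h
      · exact Or.inr (by omega)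
      · exact Or.inr (by omega)
    · rintro (h | h)
      · exact Or.inl (Or.inl h)
      · rcases Nat.eq_zero_or_pos (ds.countP (fun d => decide (pvZAdd c d = X ∧ pvZAdd c d ≠ c))) with h0 | h0
        · exact Or.inr (by simp only [pvCntA] at *; omega)
        · exact Or.inl (Or.inr (by omega))

-- membership/nodup of a filtering Set.add fold
theorem pv_mem_filter_fold {p : List Int → Prop} [DecidablePred p]
    (step : PySem.Set (List Int) → List Int → PySem.Set (List Int))
    (hstep : ∀ k x, step k x = if p x then PySem.Set.add k x else k)
    (L : List (List Int)) (s0 : PySem.Set (List Int)) (y : List Int) :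
    y ∈ L.foldl step s0 ↔ y ∈ s0 ∨ (y ∈ L ∧ p y) := by
  induction L generalizing s0 with
  | nil => simp
  | cons x L ih =>
    rw [List.foldl_cons, hstep, ih]
    by_cases hp : p x
    · rw [if_pos hp]
      constructor
      · rintro (hm | ⟨hL, hpy⟩)
        · rcases (PySem.Set.mem_add _ _ _).1 hm with h | rfl
          · exact Or.inl h
          · exact Or.inr ⟨List.mem_cons_self, hp⟩
        · exact Or.inr ⟨List.mem_cons_of_mem _ hL, hpy⟩
      · rintro (hm | ⟨hL, hpy⟩)
        · exact Or.inl ((PySem.Set.mem_add _ _ _).2 (Or.inl hm))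
        · rcases List.mem_cons.1 hL with rfl | hL
          · exact Or.inl ((PySem.Set.mem_add _ _ _).2 (Or.inr rfl))
          · exact Or.inr ⟨hL, hpy⟩
    · rw [if_neg hp]
      constructor
      · rintro (hm | ⟨hL, hpy⟩)
        · exact Or.inl hm
        · exact Or.inr ⟨List.mem_cons_of_mem _ hL, hpy⟩
      · rintro (hm | ⟨hL, hpy⟩)
        · exact Or.inl hm
        · rcases List.mem_cons.1 hL with rfl | hL
          · exact absurd hpy hp
          · exact Or.inr ⟨hL, hpy⟩

theorem pv_nodup_filter_fold {p : List Int → Prop} [DecidablePred p]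
    (step : PySem.Set (List Int) → List Int → PySem.Set (List Int))
    (hstep : ∀ k x, step k x = if p x then PySem.Set.add k x else k)
    (L : List (List Int)) (s0 : PySem.Set (List Int)) (h0 : s0.Nodup) :
    (L.foldl step s0).Nodup := by
  induction L generalizing s0 with
  | nil => exact h0
  | cons x L ih =>
    rw [List.foldl_cons, hstep]
    by_cases hp : p x
    · rw [if_pos hp]; exact ih _ (PySem.Set.nodup_add _ _ h0)
    · rw [if_neg hp]; exact ih _ h0

-- the surrounding dict, characterised
theorem pv_surround_getD (ds cubes : List (List Int)) (X : List Int) :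
    (pvSurround ds cubes).getD X 0 = (pvCntA ds cubes X : Int) := by
  unfold pvSurround
  rw [pv_dict_outer_getD]
  simp

theorem pv_surround_keys (ds cubes : List (List Int)) (X : List Int) :
    X ∈ (pvSurround ds cubes).keys ↔ pvCntA ds cubes X ≠ 0 := by
  unfold pvSurround
  rw [pv_dict_outer_keys]
  simp

-- the keep_on loop body, as a filtering add
theorem pv_keepon_body (ds cubes : List (List Int)) (k : PySem.Set (List Int)) (x : List Int) :
    (match (pvSurround ds cubes).get? x with
     | some v => if v = 2 ∨ v = 3 then PySem.Set.add k x else k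
     | none => k)
    = if pvCntA ds cubes x = 2 ∨ pvCntA ds cubes x = 3 then PySem.Set.add k x else k := by
  cases hx : (pvSurround ds cubes).get? x with
  | none =>
    have h0 : pvCntA ds cubes x = 0 := by
      by_contra hne
      exact ((PySem.Dict.get?_eq_none_iff_not_mem_keys _ _).1 hx) ((pv_surround_keys ds cubes x).2 hne)
    show k = _
    rw [if_neg (by omega)]
  | some w =>
    have hw : w = (pvCntA ds cubes x : Int) := by
      have h1 : (pvSurround ds cubes).getD x 0 = w := PySem.Dict.getD_of_get?_eq_some _ _ hx
      rw [← h1, pv_surround_getD]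
    show (if w = 2 ∨ w = 3 then PySem.Set.add k x else k) = _
    rw [hw]
    by_cases hc : pvCntA ds cubes x = 2 ∨ pvCntA ds cubes x = 3
    · rw [if_pos (by exact_mod_cast hc), if_pos hc]
    · rw [if_neg (by exact_mod_cast hc), if_neg hc]

-- the flip loop body, as a filtering add
theorem pv_flip_body (ds cubes : List (List Int)) (f : PySem.Set (List Int)) (x : List Int) :
    (if (pvSurround ds cubes).getD x 0 = 3 then PySem.Set.add f x else f)
    = if pvCntA ds cubes x = 3 then PySem.Set.add f x else f := by
  rw [pv_surround_getD]
  by_cases hc : pvCntA ds cubes x = 3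
  · rw [if_pos (by exact_mod_cast hc), if_pos hc]
  · rw [if_neg (by exact_mod_cast hc), if_neg hc]

-- A's step, characterised by the scatter count
theorem pv_stepA_mem (ds cubes : List (List Int)) (v : List Int) :
    v ∈ pvStepA ds cubes
    ↔ (v ∈ cubes ∧ (pvCntA ds cubes v = 2 ∨ pvCntA ds cubes v = 3)) ∨ pvCntA ds cubes v = 3 := by
  unfold pvStepA
  rw [PySem.Set.mem_update,
    pv_mem_filter_fold (p := fun x => pvCntA ds cubes x = 2 ∨ pvCntA ds cubes x = 3) _
      (pv_keepon_body ds cubes),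
    pv_mem_filter_fold (p := fun x => pvCntA ds cubes x = 3) _ (pv_flip_body ds cubes)]
  constructor
  · rintro ((h | h) | (h | ⟨hkk, h3⟩))
    · simp at h
    · exact Or.inl h
    · simp at h
    · exact Or.inr h3
  · rintro (⟨hm, h23⟩ | h3)
    · exact Or.inl (Or.inr ⟨hm, h23⟩)
    · exact Or.inr (Or.inr ⟨(pv_surround_keys ds cubes v).2 (by omega), h3⟩)

theorem pv_stepA_nodup (ds cubes : List (List Int)) : (pvStepA ds cubes).Nodup := by
  unfold pvStepA
  apply PySem.Set.nodup_update
  exact pv_nodup_filter_fold (p := fun x => pvCntA ds cubes x = 2 ∨ pvCntA ds cubes x = 3) _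
    (pv_keepon_body ds cubes) cubes _ List.nodup_nil

-- the scatter count only depends on the live list up to permutation
theorem pv_cntA_perm (ds : List (List Int)) (cubes cells : List (List Int)) (X : List Int)
    (h : cubes.Perm cells) : pvCntA ds cubes X = pvCntA ds cells X :=
  (h.map _).sum_eq

-- lengths produced by the truncating elementwise sum
theorem pv_length_zadd (c d : List Int) : (pvZAdd c d).length = min c.length d.length := by
  simp [pvZAdd]

theorem pv_length_zsub (a d : List Int) : (pvZSub a d).length = min a.length d.length := by
  simp [pvZSub]

-- in fixed dimension, displacing c by d gives X exactly when c is X probed back by d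
theorem pv_add_iff_sub (c d X : List Int) (hcd : c.length ≤ d.length) (hX : X.length = c.length) :
    pvZAdd c d = X ↔ c = pvZSub X d := by
  constructor
  · intro h
    subst h
    apply List.ext_getElem (by simp only [pv_length_zsub, pv_length_zadd] at *; omega)
    intro i h1 h2
    simp only [pvZSub, pvZAdd, List.getElem_map, List.getElem_zip]
    ring
  · intro h
    subst h
    apply List.ext_getElem (by simp only [pv_length_zsub, pv_length_zadd] at *; omega)
    intro i h1 h2
    simp only [pvZSub, pvZAdd, List.getElem_map, List.getElem_zip]
    ring

-- B's per-candidate probe loop, as a sum over the displacement list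
def pvGd (cells : List (List Int)) (X d : List Int) : Int :=
  if pvZSub X d ≠ X then (cells.count (pvZSub X d) : Int) else 0

theorem pv_probe_fold (ds cells : List (List Int)) (X : List Int) (a : Int) :
    ds.foldl (fun k d =>
      let probe := pvZSub X d
      if probe ≠ X then k + (PySem.Dict.counter cells).getD probe 0 else k) a
    = a + (ds.map (fun d => pvGd cells X d)).sum := by
  induction ds generalizing a with
  | nil => simp
  | cons d ds ih =>
    rw [List.foldl_cons, ih]
    simp only [List.map_cons, List.sum_cons, pvGd]
    by_cases h : pvZSub X d ≠ X
    · rw [if_pos h, if_pos h, PySem.Dict.getD_counter]; ring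
    · rw [if_neg h, if_neg h]; ring

-- the scatter count, resummed per displacement (double-sum exchange)
theorem pv_cntA_swap (ds cells : List (List Int)) (X : List Int) :
    pvCntA ds cells X
    = (ds.map (fun d => cells.countP (fun c => decide (pvZAdd c d = X ∧ pvZAdd c d ≠ c)))).sum := by
  induction cells with
  | nil => simp [pvCntA]
  | cons c cells ih =>
    simp only [pvCntA, List.map_cons, List.sum_cons] at *
    rw [ih]
    clear ih
    induction ds with
    | nil => simp
    | cons d ds ihd =>
      simp only [List.countP_cons, List.map_cons, List.sum_cons] at *
      omega

-- in fixed dimension, B's inverse probe for one displacement equals A's scatter column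
theorem pv_gd_eq (cells : List (List Int)) (X d : List Int) (L : Nat)
    (hL : ∀ c ∈ cells, c.length = L) (hd : L ≤ d.length) (hX : X.length = L) :
    pvGd cells X d = (cells.countP (fun c => decide (pvZAdd c d = X ∧ pvZAdd c d ≠ c)) : Int) := by
  have hcong : cells.countP (fun c => decide (pvZAdd c d = X ∧ pvZAdd c d ≠ c))
      = cells.countP (fun c => decide (c = pvZSub X d ∧ pvZSub X d ≠ X)) := by
    apply List.countP_congr
    intro c hc
    have hcl : c.length = L := hL c hc
    have hiff := pv_add_iff_sub c d X (by omega) (by omega)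
    simp only [decide_eq_true_eq]
    constructor
    · rintro ⟨h1, hne⟩
      have h2 : c = pvZSub X d := hiff.1 h1
      exact ⟨h2, fun he => hne (h1.trans (h2.trans he).symm)⟩
    · rintro ⟨h2, hne⟩
      have h1 : pvZAdd c d = X := hiff.2 h2
      exact ⟨h1, fun he => hne (h2.symm.trans (he.symm.trans h1))⟩
  rw [hcong]
  unfold pvGd
  by_cases hq : pvZSub X d ≠ X
  · rw [if_pos hq]
    have : cells.countP (fun c => decide (c = pvZSub X d ∧ pvZSub X d ≠ X))
        = cells.count (pvZSub X d) := by
      rw [List.count_eq_countP]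
      apply List.countP_congr
      intro c _
      simp only [decide_eq_true_eq, beq_iff_eq]
      exact ⟨fun h => h.1, fun h => ⟨h, hq⟩⟩
    rw [this]
  · rw [if_neg hq]
    have : cells.countP (fun c => decide (c = pvZSub X d ∧ pvZSub X d ≠ X)) = 0 := by
      rw [List.countP_eq_zero]
      intro c _
      simp only [decide_eq_true_eq, not_and]
      exact fun _ => hq
    rw [this]
    simp

-- in fixed dimension, the whole gather total equals A's scatter total
theorem pv_gather_eq_cntA (ds cells : List (List Int)) (X : List Int) (L : Nat)
    (hL : ∀ c ∈ cells, c.length = L) (hd : ∀ d ∈ ds, L ≤ d.length) (hX : X.length = L) :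
    (ds.map (fun d => pvGd cells X d)).sum = (pvCntA ds cells X : Int) := by
  rw [pv_cntA_swap]
  induction ds with
  | nil => simp
  | cons d ds ih =>
    simp only [List.map_cons, List.sum_cons]
    rw [pv_gd_eq cells X d L hL (hd d List.mem_cons_self) hX,
      ih (fun d' hd' => hd d' (List.mem_cons_of_mem _ hd'))]
    push_cast
    ring

-- a coordinate credited by the scatter has the common dimension
theorem pv_cntA_ne_zero_length (ds cells : List (List Int)) (X : List Int) (L : Nat)
    (hL : ∀ c ∈ cells, c.length = L) (hd : ∀ d ∈ ds, L ≤ d.length)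
    (hX : X.length ≠ L) : pvCntA ds cells X = 0 := by
  unfold pvCntA
  rw [List.sum_eq_zero]
  intro n hn
  rcases List.mem_map.1 hn with ⟨c, hc, rfl⟩
  rw [List.countP_eq_zero]
  intro d hdm
  simp only [decide_eq_true_eq, not_and]
  intro h
  exfalso
  apply hX
  rw [← h, pv_length_zadd, hL c hc]
  have := hd d hdm
  omega

-- B's candidate set: membership and dimension
theorem pv_cand_mem (ds cells : List (List Int)) (X : List Int) :
    (X ∈ PySem.Set.union (PySem.Set.ofList (cells.flatMap (fun c =>
        (ds.map (fun d => pvZAdd c d)).filter (fun t => t != c)))) cells)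
    ↔ (∃ c ∈ cells, ∃ d ∈ ds, pvZAdd c d = X ∧ pvZAdd c d ≠ c) ∨ X ∈ cells := by
  rw [PySem.Set.mem_union, PySem.Set.mem_ofList, List.mem_flatMap]
  constructor
  · rintro (⟨c, hc, hX⟩ | h)
    · rw [List.mem_filter] at hX
      rcases List.mem_map.1 hX.1 with ⟨d, hdm, rfl⟩
      exact Or.inl ⟨c, hc, d, hdm, rfl, by simpa using hX.2⟩
    · exact Or.inr h
  · rintro (⟨c, hc, d, hdm, hXe, hne⟩ | h)
    · refine Or.inl ⟨c, hc, ?_⟩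
      rw [List.mem_filter]
      exact ⟨hXe ▸ List.mem_map.2 ⟨d, hdm, rfl⟩, by simpa [hXe] using hXe ▸ hne⟩
    · exact Or.inr h

-- B's candidate-test loop body, as a filtering add
theorem pv_nxt_body (ds cells : List (List Int)) (nxt : PySem.Set (List Int)) (X : List Int) :
    (let k := ds.foldl (fun k d =>
        let probe := pvZSub X d
        if probe ≠ X then k + (PySem.Dict.counter cells).getD probe 0 else k) 0
      if k = 3 ∨ (k = 2 ∧ (PySem.Dict.counter cells).contains X = true)
      then PySem.Set.add nxt X else nxt)
    = if ((ds.map (fun d => pvGd cells X d)).sum = 3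
          ∨ ((ds.map (fun d => pvGd cells X d)).sum = 2 ∧ X ∈ cells))
      then PySem.Set.add nxt X else nxt := by
  show (if _ = 3 ∨ (_ = 2 ∧ _) then _ else _) = _
  rw [pv_probe_fold, PySem.Dict.contains_counter]
  simp only [zero_add, List.contains_eq_mem, decide_eq_true_eq]

-- B's step, characterised
theorem pv_stepB_mem (ds cells : List (List Int)) (v : List Int) :
    v ∈ pvStepB ds cells
    ↔ ((∃ c ∈ cells, ∃ d ∈ ds, pvZAdd c d = v ∧ pvZAdd c d ≠ c) ∨ v ∈ cells) ∧
      ((ds.map (fun d => pvGd cells v d)).sum = 3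
        ∨ ((ds.map (fun d => pvGd cells v d)).sum = 2 ∧ v ∈ cells)) := by
  unfold pvStepB
  rw [PySem.Dict.foldl_insert_getD_add_one_eq_counter]
  rw [pv_mem_filter_fold
      (p := fun X => (ds.map (fun d => pvGd cells X d)).sum = 3
          ∨ ((ds.map (fun d => pvGd cells X d)).sum = 2 ∧ X ∈ cells))
      _ (pv_nxt_body ds cells)]
  rw [pv_cand_mem]
  constructor
  · rintro (h | h)
    · simp at h
    · exact h
  · exact fun h => Or.inr h

theorem pv_stepB_nodup (ds cells : List (List Int)) : (pvStepB ds cells).Nodup := by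
  unfold pvStepB
  rw [PySem.Dict.foldl_insert_getD_add_one_eq_counter]
  exact pv_nodup_filter_fold
    (p := fun X => (ds.map (fun d => pvGd cells X d)).sum = 3
        ∨ ((ds.map (fun d => pvGd cells X d)).sum = 2 ∧ X ∈ cells))
    _ (pv_nxt_body ds cells) _ _ List.nodup_nil

-- a nonzero scatter count is witnessed by a displaced live cell (a candidate)
theorem pv_cntA_witness (ds cells : List (List Int)) (X : List Int)
    (h : pvCntA ds cells X ≠ 0) :
    ∃ c ∈ cells, ∃ d ∈ ds, pvZAdd c d = X ∧ pvZAdd c d ≠ c := by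
  unfold pvCntA at h
  have : ∃ n ∈ (cells.map (fun c => ds.countP (fun d => decide (pvZAdd c d = X ∧ pvZAdd c d ≠ c)))), n ≠ 0 := by
    by_contra hall
    push Not at hall
    exact h (List.sum_eq_zero hall)
  rcases this with ⟨n, hn, hne⟩
  rcases List.mem_map.1 hn with ⟨c, hc, rfl⟩
  have : 0 < ds.countP (fun d => decide (pvZAdd c d = X ∧ pvZAdd c d ≠ c)) := Nat.pos_of_ne_zero hne
  rcases List.countP_pos_iff.1 this with ⟨d, hdm, hp⟩
  simp only [decide_eq_true_eq] at hp
  exact ⟨c, hc, d, hdm, hp.1, hp.2⟩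

-- one cycle: permutation-equal live sets step to permutation-equal live sets
theorem pv_step_mem_eq (ds : List (List Int)) (L : Nat)
    (hd : ∀ d ∈ ds, L ≤ d.length)
    (cubes cells : List (List Int)) (hperm : cubes.Perm cells)
    (hL : ∀ c ∈ cells, c.length = L) (v : List Int) :
    v ∈ pvStepA ds cubes ↔ v ∈ pvStepB ds cells := by
  rw [pv_stepA_mem, pv_stepB_mem, pv_cntA_perm ds cubes cells v hperm]
  have hmemc : ∀ x, x ∈ cubes ↔ x ∈ cells := fun x => hperm.mem_iff
  by_cases hXl : v.length = L
  · rw [show (ds.map (fun d => pvGd cells v d)).sum = (pvCntA ds cells v : Int) from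
      pv_gather_eq_cntA ds cells v L hL hd hXl]
    constructor
    · rintro (⟨hv, h2 | h3⟩ | h3)
      · exact ⟨Or.inr ((hmemc v).1 hv), Or.inr ⟨by exact_mod_cast h2, (hmemc v).1 hv⟩⟩
      · exact ⟨Or.inl (pv_cntA_witness ds cells v (by omega)), Or.inl (by exact_mod_cast h3)⟩
      · exact ⟨Or.inl (pv_cntA_witness ds cells v (by omega)), Or.inl (by exact_mod_cast h3)⟩
    · rintro ⟨_, h3 | ⟨h2, hv⟩⟩
      · exact Or.inr (by exact_mod_cast h3)
      · exact Or.inl ⟨(hmemc v).2 hv, Or.inl (by exact_mod_cast h2)⟩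
  · have h0 : pvCntA ds cells v = 0 := pv_cntA_ne_zero_length ds cells v L hL hd hXl
    have hnm : v ∉ cells := fun hv => hXl (hL v hv)
    constructor
    · rintro (⟨hv, _⟩ | h3)
      · exact absurd ((hmemc v).1 hv) hnm
      · omega
    · rintro ⟨hcand, _⟩
      rcases hcand with ⟨c, hc, d, hdm, hXe, _⟩ | hv
      · exfalso
        apply hXl
        rw [← hXe, pv_length_zadd, hL c hc]
        have := hd d hdm
        omega
      · exact absurd hv hnm

-- B's step stays in the common dimension
theorem pv_stepB_length (ds cells : List (List Int)) (L : Nat)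
    (hd : ∀ d ∈ ds, L ≤ d.length) (hL : ∀ c ∈ cells, c.length = L) :
    ∀ v ∈ pvStepB ds cells, v.length = L := by
  intro v hv
  rcases (pv_stepB_mem ds cells v).1 hv with ⟨hcand, _⟩
  rcases hcand with ⟨c, hc, d, hdm, hXe, _⟩ | hvm
  · rw [← hXe, pv_length_zadd, hL c hc]
    have := hd d hdm
    omega
  · exact hL v hvm

-- the cycle loop, with the dimension invariant
theorem pv_loop_eq (ds : List (List Int)) (L : Nat) (hd : ∀ d ∈ ds, L ≤ d.length)
    (l : List Int) :
    ∀ (cubes cells : List (List Int)), cubes.Perm cells → (∀ c ∈ cells, c.length = L) →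
    (l.foldl (fun s _ => pvStepA ds s) cubes).length
      = (l.foldl (fun s _ => pvStepB ds s) cells).length := by
  induction l with
  | nil =>
    intro cubes cells hperm _
    exact hperm.length_eq
  | cons a l ih =>
    intro cubes cells hperm hL
    rw [List.foldl_cons, List.foldl_cons]
    have hmem := pv_step_mem_eq ds L hd cubes cells hperm hL
    have hperm' : (pvStepA ds cubes).Perm (pvStepB ds cells) :=
      (List.perm_ext_iff_of_nodup (pv_stepA_nodup ds cubes) (pv_stepB_nodup ds cells)).2 hmem
    exact ih _ _ hperm' (pv_stepB_length ds cells L hd hL)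

-- ===== VERDICT (by name: the statement is the Claim_ definition above) =====
theorem unfold_via_cycle_spec : Claim_equal_unfold_via_cycle := by
  intro on_cubes displacements cycles _ hpre
  unfold Spec_unfold_via_cycle unfold_via_cycle unfold_via_cycle_alt
  rcases hpre with hc0 | ⟨hL, hd⟩
  · rw [PySem.List.pyRange_one_eq_nil hc0]
    rfl
  · exact_mod_cast pv_loop_eq displacements (on_cubes.headD []).length hd
      (PySem.List.pyRange 0 cycles 1) on_cubes on_cubes (List.Perm.refl _) hL
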